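-- pv_equiv track=rewrite | github.com/risi-kondor/GElib | python/gelib_torchB.py | DiagCGproductType
-- ===== SOURCE A (Python) =====
-- def DiagCGproductType(x,maxl=-1):
--     if maxl==-1:
--         maxl=2*len(x)-2
--     r=[0]*(maxl+1)
--     for l1 in range(0,len(x)):
--         for l2 in range(0,len(x)):
--             for l in range(abs(l1-l2),min(l1+l2,maxl)+1):
--                 r[l]+=1
--     return r
-- ===== SOURCE B (Python) =====
-- def DiagCGproductType(x, maxl=-1):
--     n = len(x)
--     if maxl == -1:
--         maxl = 2 * n - 2
--     # difference array: each pair contributes +1 on the interval [lo, hi]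
--     diff = [0] * (maxl + 2)
--     for l1 in range(n):
--         for l2 in range(n):
--             lo = abs(l1 - l2)
--             hi = min(l1 + l2, maxl)
--             if lo <= hi:
--                 diff[lo] += 1
--                 diff[hi + 1] -= 1
--     out = []
--     acc = 0
--     for l in range(maxl + 1):
--         acc += diff[l]
--         out.append(acc)
--     return out
-- ===== Notes on version B (the rewrite author's own statement) =====
-- stated objective: faster
-- what changed: Replaces A's innermost per-l increment loop over each pair's interval [|l1-l2|, min(l1+l2,maxl)] by a difference array (+1 at the interval start, -1 past its end) followed by a single prefix-sum pass.
import Mathlib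
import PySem

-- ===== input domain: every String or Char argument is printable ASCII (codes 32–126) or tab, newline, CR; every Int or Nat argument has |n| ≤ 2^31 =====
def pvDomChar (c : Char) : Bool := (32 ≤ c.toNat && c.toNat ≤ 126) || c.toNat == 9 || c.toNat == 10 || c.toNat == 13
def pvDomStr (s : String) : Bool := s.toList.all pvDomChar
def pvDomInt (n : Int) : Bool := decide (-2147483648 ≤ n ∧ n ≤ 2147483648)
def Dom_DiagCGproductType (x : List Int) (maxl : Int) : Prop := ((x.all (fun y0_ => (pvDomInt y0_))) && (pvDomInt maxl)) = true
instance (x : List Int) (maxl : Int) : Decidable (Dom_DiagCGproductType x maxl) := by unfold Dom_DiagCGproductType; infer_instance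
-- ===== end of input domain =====

-- B replaces the innermost 'for l in range(lo, hi+1)' increment loop of A by a
-- difference array (+1 at lo, -1 at hi+1, then one prefix-sum pass): O(n^2 + maxl)
-- instead of A's O(n^2 * maxl). Same return value on every input (both are total).

-- shared primitive helper: xs[i] += 1 / xs[i] -= 1 (Python item read+write; both
-- programs only use it with 0 ≤ i < len, where pyGetD/pySetD are exact)
def pyIncr (r : List Int) (i : Int) : List Int :=
  PySem.List.pySetD r i (PySem.List.pyGetD r i 0 + 1)
def pyDecr (r : List Int) (i : Int) : List Int :=
  PySem.List.pySetD r i (PySem.List.pyGetD r i 0 - 1)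

-- ===== PORT A =====
def DiagCGproductType (x : List Int) (maxl : Int) : List Int :=
  let m : Int := if maxl = -1 then 2 * (x.length : Int) - 2 else maxl
  let r : List Int := List.replicate (m + 1).toNat 0
  (PySem.List.pyRange 0 (x.length : Int) 1).foldl (fun r l1 =>
    (PySem.List.pyRange 0 (x.length : Int) 1).foldl (fun r l2 =>
      (PySem.List.pyRange |l1 - l2| (min (l1 + l2) m + 1) 1).foldl pyIncr r) r) r

-- ===== PORT B =====
def DiagCGproductType_alt (x : List Int) (maxl : Int) : List Int :=
  let n : Int := (x.length : Int)
  let m : Int := if maxl = -1 then 2 * n - 2 else maxl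
  let diff : List Int := List.replicate (m + 2).toNat 0
  let diff :=
    (PySem.List.pyRange 0 n 1).foldl (fun diff l1 =>
      (PySem.List.pyRange 0 n 1).foldl (fun diff l2 =>
        let lo := |l1 - l2|
        let hi := min (l1 + l2) m
        if lo ≤ hi then pyDecr (pyIncr diff lo) (hi + 1) else diff) diff) diff
  ((PySem.List.pyRange 0 (m + 1) 1).foldl (fun (p : List Int × Int) l =>
      let acc := p.2 + PySem.List.pyGetD diff l 0
      (p.1 ++ [acc], acc)) (([] : List Int), (0 : Int))).1

-- ===== PRECONDITION & SPEC =====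
def Spec_DiagCGproductType (x : List Int) (maxl : Int) (out : List Int) : Prop := out = DiagCGproductType_alt x maxl
instance (x : List Int) (maxl : Int) (out : List Int) : Decidable (Spec_DiagCGproductType x maxl out) := by unfold Spec_DiagCGproductType; infer_instance

-- ===== CLAIM (what is proved, stated in full; the proofs are below) =====
def Claim_equal_DiagCGproductType : Prop := ∀ (x : List Int) (maxl : Int), Dom_DiagCGproductType x maxl → Spec_DiagCGproductType x maxl (DiagCGproductType x maxl)

-- ===== LEMMAS AND PROOFS =====

-- nested loop over two lists = single loop over the pair list
theorem foldl_nest {α : Type} (g : α → Int → Int → α) :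
    ∀ (L1 : List Int) (L2 : List Int) (a : α),
      L1.foldl (fun a b => L2.foldl (fun a c => g a b c) a) a
        = (L1.flatMap (fun b => L2.map (Prod.mk b))).foldl (fun a p => g a p.1 p.2) a := by
  intro L1
  induction L1 with
  | nil => intro L2 a; rfl
  | cons b L1 ih =>
      intro L2 a
      simp [List.flatMap_cons, List.foldl_append, List.foldl_map, ih]

theorem length_pyIncr (r : List Int) (i : Int) : (pyIncr r i).length = r.length := by
  simp [pyIncr, PySem.List.length_pySetD]

theorem length_pyDecr (r : List Int) (i : Int) : (pyDecr r i).length = r.length := by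
  simp [pyDecr, PySem.List.length_pySetD]

theorem getD_set_int (l : List Int) (i : Nat) (v : Int) (hi : i < l.length) (j : Nat) :
    (l.set i v).getD j 0 = if i = j then v else l.getD j 0 := by
  simp [List.getD_eq_getElem?_getD, List.getElem?_set]
  split_ifs with h1 <;> simp

theorem pyIncr_getD (r : List Int) (i : Int) (h0 : 0 ≤ i) (hi : i < (r.length : Int)) (j : Nat) :
    (pyIncr r i).getD j 0 = r.getD j 0 + (if i = (j : Int) then 1 else 0) := by
  have hlt : i.toNat < r.length := by omega
  rw [pyIncr, PySem.List.pySetD_of_nonneg r _ h0, PySem.List.pyGetD_eq_getElem r 0 h0 hi,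
    getD_set_int r i.toNat _ hlt j]
  by_cases h : i.toNat = j
  · rw [if_pos h, if_pos (by omega), List.getD_eq_getElem r 0 (by omega : j < r.length)]
    subst h; rfl
  · rw [if_neg h, if_neg (by omega)]; ring

-- A's innermost loop
def incrRange (r : List Int) (a b : Int) : List Int :=
  (PySem.List.pyRange a b 1).foldl pyIncr r

theorem length_incrRange (a b : Int) : ∀ (r : List Int), (incrRange r a b).length = r.length := by
  unfold incrRange
  generalize PySem.List.pyRange a b 1 = L
  induction L with
  | nil => intro r; rfl
  | cons c L ih => intro r; simp [List.foldl_cons, ih, length_pyIncr]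

theorem incrRange_getD : ∀ (k : Nat) (a b : Int), (b - a).toNat = k →
    ∀ (r : List Int), 0 ≤ a → b ≤ (r.length : Int) → ∀ (j : Nat),
    (incrRange r a b).getD j 0
      = r.getD j 0 + (if a ≤ (j : Int) ∧ (j : Int) < b then 1 else 0) := by
  intro k
  induction k with
  | zero =>
      intro a b hk r ha hb j
      have hba : b ≤ a := by omega
      rw [show incrRange r a b = r from by
        simp [incrRange, PySem.List.pyRange_one_eq_nil hba]]
      rw [if_neg (by omega)]
      ring
  | succ k ih =>
      intro a b hk r ha hb j
      have hab : a < b := by omega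
      have hstep : incrRange r a b = incrRange (pyIncr r a) (a + 1) b := by
        simp [incrRange, PySem.List.pyRange_one_cons hab]
      rw [hstep,
        ih (a + 1) b (by omega) (pyIncr r a) (by omega) (by rw [length_pyIncr]; exact hb) j,
        pyIncr_getD r a ha (by omega) j]
      generalize r.getD j 0 = c
      split_ifs <;> omega

-- the pair predicate shared by the two counting arguments
def predPair (m : Int) (j : Nat) (p : Int × Int) : Bool :=
  decide (|p.1 - p.2| ≤ (j : Int) ∧ (j : Int) ≤ min (p.1 + p.2) m)

def foldA (m : Int) (P : List (Int × Int)) (r : List Int) : List Int :=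
  P.foldl (fun r p => incrRange r |p.1 - p.2| (min (p.1 + p.2) m + 1)) r

theorem length_foldA (m : Int) : ∀ (P : List (Int × Int)) (r : List Int),
    (foldA m P r).length = r.length := by
  intro P
  induction P with
  | nil => intro r; rfl
  | cons p P ih => intro r; simp only [foldA, List.foldl_cons] at ih ⊢; rw [ih, length_incrRange]

theorem foldA_getD (m : Int) : ∀ (P : List (Int × Int)) (r : List Int),
    r.length = (m + 1).toNat → ∀ (j : Nat),
    (foldA m P r).getD j 0 = r.getD j 0 + ((P.countP (predPair m j) : Nat) : Int) := by
  intro P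
  induction P with
  | nil => intro r hr j; simp [foldA]
  | cons p P ih =>
      intro r hr j
      have hstep : foldA m (p :: P) r
          = foldA m P (incrRange r |p.1 - p.2| (min (p.1 + p.2) m + 1)) := rfl
      have hb : min (p.1 + p.2) m + 1 ≤ (r.length : Int) := by
        have h1 : ((m + 1).toNat : Int) = max (m + 1) 0 := by omega
        have h2 : min (p.1 + p.2) m ≤ m := min_le_right _ _
        rw [hr, h1]; omega
      rw [hstep, ih _ (by rw [length_incrRange]; exact hr) j,
        incrRange_getD (min (p.1 + p.2) m + 1 - |p.1 - p.2|).toNat _ _ rfl r (abs_nonneg _) hb j,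
        List.countP_cons]
      have habs : (0 : Int) ≤ |p.1 - p.2| := abs_nonneg _
      simp only [predPair, decide_eq_true_eq]
      push_cast
      generalize r.getD j 0 = c
      generalize ((P.countP (predPair m j) : Nat) : Int) = t
      split_ifs <;> omega

-- B's difference-array side: prefix sums T d k = sum of the first k cells
def T (d : List Int) (k : Nat) : Int := (d.take k).sum

def stepB (m : Int) (diff : List Int) (p : Int × Int) : List Int :=
  if |p.1 - p.2| ≤ min (p.1 + p.2) m then
    pyDecr (pyIncr diff |p.1 - p.2|) (min (p.1 + p.2) m + 1)
  else diff

theorem length_stepB (m : Int) (diff : List Int) (p : Int × Int) :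
    (stepB m diff p).length = diff.length := by
  unfold stepB; split <;> simp [length_pyIncr, length_pyDecr]

theorem sum_take_set : ∀ (d : List Int) (i k : Nat) (v : Int), i < d.length →
    ((d.set i v).take k).sum = (d.take k).sum + (if i < k then v - d.getD i 0 else 0) := by
  intro d
  induction d with
  | nil => intro i k v hi; simp at hi
  | cons a d ih =>
      intro i k v hi
      cases i with
      | zero =>
          cases k with
          | zero => simp
          | succ k => simp [List.set_cons_zero, List.getD]; ring
      | succ i =>
          cases k with
          | zero => simp
          | succ k =>
              have hi' : i < d.length := by simpa using hi
              simp only [List.set_cons_succ, List.take_succ_cons, List.sum_cons,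
                ih i k v hi', List.getD_cons_succ, Nat.succ_lt_succ_iff]
              split <;> ring

theorem T_pyIncr (d : List Int) (i : Int) (h0 : 0 ≤ i) (hi : i < (d.length : Int)) (k : Nat) :
    T (pyIncr d i) k = T d k + (if i < (k : Int) then 1 else 0) := by
  have hlt : i.toNat < d.length := by omega
  simp only [T]
  rw [pyIncr, PySem.List.pySetD_of_nonneg d _ h0, PySem.List.pyGetD_eq_getElem d 0 h0 hi,
    sum_take_set d i.toNat k _ hlt, List.getD_eq_getElem d 0 hlt]
  by_cases h : i.toNat < k
  · rw [if_pos h, if_pos (show i < (k : Int) by omega)]; ring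
  · rw [if_neg h, if_neg (show ¬ i < (k : Int) by omega)]

theorem T_pyDecr (d : List Int) (i : Int) (h0 : 0 ≤ i) (hi : i < (d.length : Int)) (k : Nat) :
    T (pyDecr d i) k = T d k - (if i < (k : Int) then 1 else 0) := by
  have hlt : i.toNat < d.length := by omega
  simp only [T]
  rw [pyDecr, PySem.List.pySetD_of_nonneg d _ h0, PySem.List.pyGetD_eq_getElem d 0 h0 hi,
    sum_take_set d i.toNat k _ hlt, List.getD_eq_getElem d 0 hlt]
  by_cases h : i.toNat < k
  · rw [if_pos h, if_pos (show i < (k : Int) by omega)]; ring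
  · rw [if_neg h, if_neg (show ¬ i < (k : Int) by omega)]; ring

theorem foldB_T (m : Int) : ∀ (P : List (Int × Int)) (diff : List Int),
    diff.length = (m + 2).toNat → ∀ (j : Nat),
    T (P.foldl (stepB m) diff) (j + 1)
      = T diff (j + 1) + ((P.countP (predPair m j) : Nat) : Int) := by
  intro P
  induction P with
  | nil => intro diff hd j; simp
  | cons p P ih =>
      intro diff hd j
      rw [List.foldl_cons, ih (stepB m diff p) (by rw [length_stepB]; exact hd) j,
        List.countP_cons]
      have hminle : min (p.1 + p.2) m ≤ m := min_le_right _ _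
      have habs : (0 : Int) ≤ |p.1 - p.2| := abs_nonneg _
      unfold stepB
      by_cases hle : |p.1 - p.2| ≤ min (p.1 + p.2) m
      · rw [if_pos hle]
        have hm0 : 0 ≤ m := le_trans (le_trans habs hle) hminle
        have hdlen : ((diff.length : Nat) : Int) = m + 2 := by rw [hd]; omega
        rw [T_pyDecr _ _ (by omega) (by rw [length_pyIncr]; omega) (j + 1),
            T_pyIncr _ _ habs (by omega) (j + 1)]
        simp only [predPair, decide_eq_true_eq]
        push_cast
        generalize T diff ((j : Nat) + 1) = t
        generalize ((P.countP (predPair m j) : Nat) : Int) = c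
        split_ifs <;> omega
      · rw [if_neg hle]
        simp only [predPair, decide_eq_true_eq]
        push_cast
        generalize T diff ((j : Nat) + 1) = t
        generalize ((P.countP (predPair m j) : Nat) : Int) = c
        split_ifs <;> omega

-- the prefix-sum output loop of B
theorem outFold_spec (diff : List Int) : ∀ (k : Nat),
    (PySem.List.pyRange 0 (k : Int) 1).foldl (fun (p : List Int × Int) l =>
        (p.1 ++ [p.2 + PySem.List.pyGetD diff l 0], p.2 + PySem.List.pyGetD diff l 0))
      (([] : List Int), (0 : Int))
    = ((List.range k).map (fun j => T diff (j + 1)), T diff k) := by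
  intro k
  induction k with
  | zero => simp [T]
  | succ k ih =>
      have hsplit : PySem.List.pyRange 0 ((k + 1 : Nat) : Int) 1
          = PySem.List.pyRange 0 (k : Int) 1 ++ [(k : Int)] := by
        have := PySem.List.pyRange_one_succ_right (a := 0) (b := (k : Int)) (by omega)
        push_cast
        simpa using this
      rw [hsplit, List.foldl_append, ih, List.range_succ, List.map_append]
      have hT : T diff k + diff[k]?.getD 0 = T diff (k + 1) := by
        rw [T, T, List.take_add_one]
        cases diff[k]? with
        | none => simp
        | some v => simp
      simp [PySem.List.pyGetD_natCast, List.getD_eq_getElem?_getD, hT]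

theorem T_replicate_zero (n k : Nat) : T (List.replicate n (0 : Int)) k = 0 := by
  simp [T, List.take_replicate]

theorem pyRange_zero_toNat (b : Int) :
    PySem.List.pyRange 0 b 1 = PySem.List.pyRange 0 ((b.toNat : Nat) : Int) 1 := by
  rcases le_or_gt 0 b with h | h
  · rw [Int.toNat_of_nonneg h]
  · rw [PySem.List.pyRange_one_eq_nil (by omega : b ≤ 0),
        PySem.List.pyRange_one_eq_nil (by omega : ((b.toNat : Nat) : Int) ≤ 0)]

-- the core equality, for the common shifted maxl value m
theorem core_eq (n : Nat) (m : Int) :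
    (PySem.List.pyRange 0 (n : Int) 1).foldl (fun r l1 =>
      (PySem.List.pyRange 0 (n : Int) 1).foldl (fun r l2 =>
        (PySem.List.pyRange |l1 - l2| (min (l1 + l2) m + 1) 1).foldl pyIncr r) r)
      (List.replicate (m + 1).toNat 0)
    = ((PySem.List.pyRange 0 (m + 1) 1).foldl (fun (p : List Int × Int) l =>
        (p.1 ++ [p.2 + PySem.List.pyGetD
            ((PySem.List.pyRange 0 (n : Int) 1).foldl (fun diff l1 =>
              (PySem.List.pyRange 0 (n : Int) 1).foldl (fun diff l2 =>
                if |l1 - l2| ≤ min (l1 + l2) m then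
                  pyDecr (pyIncr diff |l1 - l2|) (min (l1 + l2) m + 1)
                else diff) diff) (List.replicate (m + 2).toNat 0)) l 0],
         p.2 + PySem.List.pyGetD
            ((PySem.List.pyRange 0 (n : Int) 1).foldl (fun diff l1 =>
              (PySem.List.pyRange 0 (n : Int) 1).foldl (fun diff l2 =>
                if |l1 - l2| ≤ min (l1 + l2) m then
                  pyDecr (pyIncr diff |l1 - l2|) (min (l1 + l2) m + 1)
                else diff) diff) (List.replicate (m + 2).toNat 0)) l 0))
      (([] : List Int), (0 : Int))).1 := by
  set L := PySem.List.pyRange 0 (n : Int) 1 with hL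
  set P : List (Int × Int) := L.flatMap (fun b => L.map (Prod.mk b)) with hP
  have hA : L.foldl (fun r l1 => L.foldl (fun r l2 =>
        (PySem.List.pyRange |l1 - l2| (min (l1 + l2) m + 1) 1).foldl pyIncr r) r)
        (List.replicate (m + 1).toNat 0)
      = foldA m P (List.replicate (m + 1).toNat 0) := by
    rw [foldl_nest (fun r a b => (PySem.List.pyRange |a - b| (min (a + b) m + 1) 1).foldl pyIncr r) L L]
    rfl
  have hB : L.foldl (fun diff l1 => L.foldl (fun diff l2 =>
        if |l1 - l2| ≤ min (l1 + l2) m then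
          pyDecr (pyIncr diff |l1 - l2|) (min (l1 + l2) m + 1)
        else diff) diff) (List.replicate (m + 2).toNat 0)
      = P.foldl (stepB m) (List.replicate (m + 2).toNat 0) := by
    rw [foldl_nest (fun diff a b =>
      if |a - b| ≤ min (a + b) m then pyDecr (pyIncr diff |a - b|) (min (a + b) m + 1) else diff) L L]
    rfl
  rw [hA, hB, pyRange_zero_toNat (m + 1), outFold_spec]
  apply List.ext_getElem
  · simp [length_foldA]
  · intro j h1 h2
    have hpair : ∀ (u : List Int) (v : Int), (u, v).1 = u := fun _ _ => rfl
    have hjm : j < (m + 1).toNat := by simpa using h2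
    rw [← List.getD_eq_getElem _ 0 h1, ← List.getD_eq_getElem _ 0 h2, hpair,
      foldA_getD m P _ (by simp) j,
      List.getD_eq_getElem (List.map (fun i =>
          T (P.foldl (stepB m) (List.replicate (m + 2).toNat 0)) (i + 1))
        (List.range (m + 1).toNat)) 0 (by simpa using hjm),
      List.getElem_map, List.getElem_range,
      foldB_T m P _ (by simp) j, T_replicate_zero]
    simp

-- ===== VERDICT (by name: the statement is the Claim_ definition above) =====
theorem DiagCGproductType_spec : Claim_equal_DiagCGproductType := by
  intro x maxl _
  unfold Spec_DiagCGproductType DiagCGproductType DiagCGproductType_alt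
  exact core_eq x.length (if maxl = -1 then 2 * (x.length : Int) - 2 else maxl)
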